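-- pv_equiv track=rewrite | github.com/Trusty-McGurk/salsa2 | salsa.py | encrypt_plaintext
-- ===== SOURCE A (Python) =====
-- def littleendian(b):
--     assert len(b) == 4
--     return b[0] ^ (b[1] << 8) ^ (b[2] << 16) ^ (b[3] << 24)
--
-- def encrypt_plaintext(ptext, s):
--     bytemsg = list(map(lambda x: ord(x), list(ptext)))
--     bytemsg_8 = [littleendian(bytemsg[i * 4:i * 4 + 4])for i in range(len(bytemsg)//4)]
--     remainder = [0] * 4
--     for i in range (len(bytemsg) % 4):
--         remainder[i] = bytemsg[len(bytemsg) - (len(bytemsg) % 4) + i]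
--     bytemsg_8.append(littleendian(remainder))
--     mark = 0
--     retlist = [None] * len(bytemsg_8)
--     for i in range(len(bytemsg_8)):
--         retlist[i] = bytemsg_8[i] ^ s[mark]
--         mark = mark + 1
--         if mark == 16:
--             mark = 0
--
--     return retlist
-- ===== SOURCE B (Python) =====
-- def encrypt_plaintext(ptext, s):
--     # View the whole message as ONE little-endian big integer; extract 32-bit words
--     # by shifting/masking (the final partial word's zero padding is implicit).
--     big = int.from_bytes(bytes(ord(c) for c in ptext), 'little')
--     return [((big >> (32 * i)) & 0xFFFFFFFF) ^ s[i % 16]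
--             for i in range(len(ptext) // 4 + 1)]
-- ===== Notes on version B (the rewrite author's own statement) =====
-- stated objective: alternative
-- what changed: B replaces A's chunk-slice/remainder-fill/mark-counter passes by viewing the whole message as one little-endian big integer (int.from_bytes) and extracting each 32-bit word by shift-and-mask, XORing it with s[i % 16]; zero padding of the final partial word is implicit in the integer.
import Mathlib
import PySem

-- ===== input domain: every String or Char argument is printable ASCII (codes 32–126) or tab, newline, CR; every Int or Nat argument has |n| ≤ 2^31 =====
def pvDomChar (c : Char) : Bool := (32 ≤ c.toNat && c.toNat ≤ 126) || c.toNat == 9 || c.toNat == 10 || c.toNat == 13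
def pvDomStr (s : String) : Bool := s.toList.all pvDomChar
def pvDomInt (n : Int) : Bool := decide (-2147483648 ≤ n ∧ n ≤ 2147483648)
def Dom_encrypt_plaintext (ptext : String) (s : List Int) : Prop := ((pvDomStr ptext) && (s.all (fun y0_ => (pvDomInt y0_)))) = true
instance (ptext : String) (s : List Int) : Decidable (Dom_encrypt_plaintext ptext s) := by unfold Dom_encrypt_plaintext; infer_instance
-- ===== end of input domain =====

-- B treats the whole message as one little-endian big integer and extracts the XORed 32-bit words
-- by shift-and-mask (objective: alternative; return value only).

-- ===== PORT A =====
-- A's helper `littleendian`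
def littleendian (b : List Int) : Int :=
  PySem.Int.bxor
    (PySem.Int.bxor
      (PySem.Int.bxor (PySem.List.pyGetD b 0 0) ((PySem.List.pyGetD b 1 0) <<< (8 : Nat)))
      ((PySem.List.pyGetD b 2 0) <<< (16 : Nat)))
    ((PySem.List.pyGetD b 3 0) <<< (24 : Nat))

def encrypt_plaintext (ptext : String) (s : List Int) : List Int :=
  let bytemsg : List Int := ptext.toList.map (fun x => (x.toNat : Int))
  let bytemsg8 : List Int := (List.range (bytemsg.length / 4)).map
    (fun i => littleendian (PySem.List.slice bytemsg (some ((i * 4 : Nat) : Int)) (some ((i * 4 + 4 : Nat) : Int))))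
  let remainder : List Int := (List.range (bytemsg.length % 4)).foldl
    (fun r i =>
      r.set i (PySem.List.pyGetD bytemsg ((bytemsg.length : Int) - ((bytemsg.length % 4 : Nat) : Int) + (i : Int)) 0))
    (List.replicate 4 (0 : Int))
  let bytemsg8 := bytemsg8 ++ [littleendian remainder]
  (bytemsg8.foldl
    (fun (acc : List Int × Nat) w =>
      let retlist := acc.1 ++ [PySem.Int.bxor w (PySem.List.pyGetD s ((acc.2 : Nat) : Int) 0)]
      let mark := acc.2 + 1
      (retlist, if mark = 16 then 0 else mark))
    ([], 0)).1

-- ===== PORT B =====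
-- port of Source B's `int.from_bytes(bytes, 'little')`: little-endian base-256 value of the byte list
def ofLE (l : List Nat) : Nat := l.foldr (fun b acc => b + 256 * acc) 0

def encrypt_plaintext_alt (ptext : String) (s : List Int) : List Int :=
  let big : Nat := ofLE (ptext.toList.map (fun c => c.toNat))
  (List.range (ptext.toList.length / 4 + 1)).map
    (fun i => PySem.Int.bxor ((((big >>> (32 * i)) &&& 0xFFFFFFFF : Nat)) : Int)
      (PySem.List.pyGetD s ((i % 16 : Nat) : Int) 0))

-- ===== PRECONDITION & SPEC =====
-- Pre_ excludes exactly the inputs on which the Python A raises IndexError: s too short for the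
-- keystream indices 0 .. min(15, len(ptext)//4) that the loop reads.
def Pre_encrypt_plaintext (ptext : String) (s : List Int) : Prop :=
  min 16 (ptext.length / 4 + 1) ≤ s.length
instance (ptext : String) (s : List Int) : Decidable (Pre_encrypt_plaintext ptext s) := by
  unfold Pre_encrypt_plaintext; infer_instance

def pvWitness_encrypt_plaintext : String × List Int := ("abcde!", [3, 1000000])

def Spec_encrypt_plaintext (ptext : String) (s : List Int) (out : List Int) : Prop := out = encrypt_plaintext_alt ptext s
instance (ptext : String) (s : List Int) (out : List Int) : Decidable (Spec_encrypt_plaintext ptext s out) := by unfold Spec_encrypt_plaintext; infer_instance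

-- ===== CLAIM (what is proved, stated in full; the proofs are below) =====
def Claim_equal_encrypt_plaintext : Prop := ∀ (ptext : String) (s : List Int), Dom_encrypt_plaintext ptext s → Pre_encrypt_plaintext ptext s → Spec_encrypt_plaintext ptext s (encrypt_plaintext ptext s)

-- ===== LEMMAS AND PROOFS =====

-- A's mark-counter fold over the word list equals indexing the keystream by position mod 16.
theorem loop_eq (s : List Int) (ws : List Int) : ∀ (acc : List Int) (k : Nat),
    (ws.foldl
      (fun (acc : List Int × Nat) w =>
        let retlist := acc.1 ++ [PySem.Int.bxor w (PySem.List.pyGetD s ((acc.2 : Nat) : Int) 0)]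
        let mark := acc.2 + 1
        (retlist, if mark = 16 then 0 else mark))
      (acc, k % 16)).1
    = acc ++ ws.mapIdx (fun i w => PySem.Int.bxor w (PySem.List.pyGetD s (((k + i) % 16 : Nat) : Int) 0)) := by
  induction ws with
  | nil => intro acc k; simp
  | cons w ws ih =>
    intro acc k
    have hm : (if k % 16 + 1 = 16 then 0 else k % 16 + 1) = (k + 1) % 16 := by
      split <;> omega
    simp only [List.foldl_cons, List.mapIdx_cons, Nat.add_zero]
    rw [hm, ih (acc ++ [PySem.Int.bxor w (PySem.List.pyGetD s ((k % 16 : Nat) : Int) 0)]) (k + 1)]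
    rw [List.append_assoc, List.singleton_append]
    have hfun : (fun (i : Nat) (x : Int) =>
        PySem.Int.bxor x (PySem.List.pyGetD s (((k + 1 + i) % 16 : Nat) : Int) 0))
        = (fun (i : Nat) (x : Int) =>
        PySem.Int.bxor x (PySem.List.pyGetD s (((k + (i + 1)) % 16 : Nat) : Int) 0)) := by
      funext i x
      rw [show k + 1 + i = k + (i + 1) by omega]
    rw [hfun]

-- A's remainder-filling loop builds exactly the zero-padded suffix.
theorem remainder_eq (data : List Int) :
    ((List.range (data.length % 4)).foldl
      (fun r i =>
        r.set i (PySem.List.pyGetD data ((data.length : Int) - ((data.length % 4 : Nat) : Int) + (i : Int)) 0))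
      (List.replicate 4 (0 : Int)))
    = data.drop (data.length - data.length % 4) ++ List.replicate (4 - data.length % 4) (0 : Int) := by
  set n := data.length with hn
  set r := n % 4 with hrdef
  have hr4 : r < 4 := by omega
  have hrn : r ≤ n := by omega
  have hsuf : (data.drop (n - r)).length = r := by simp [hn]; omega
  have hget : ∀ (i : ℤ) (j : ℕ), j < r → i = (n : Int) - ((r : Nat) : Int) + (j : Int) →
      PySem.List.pyGetD data i 0 = (data.drop (n - r)).getD j 0 := by
    intro i j hj hi
    have hcast : i = ((n - r + j : Nat) : Int) := by omega
    rw [hcast, PySem.List.pyGetD_natCast]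
    simp [List.getD, List.getElem?_drop]
  set suf := data.drop (n - r) with hsufdef
  interval_cases r
  · simp at hsuf
    simp [hsuf]
  · obtain ⟨a, ha⟩ := List.length_eq_one_iff.mp hsuf
    rw [List.range_succ]
    simp only [List.range_zero, List.nil_append, List.foldl_cons, List.foldl_nil]
    rw [hget _ 0 (by omega) (by push_cast; ring), ha]
    rfl
  · obtain ⟨a, b, hab⟩ := List.length_eq_two.mp hsuf
    rw [show List.range 2 = [0, 1] from rfl]
    simp only [List.foldl_cons, List.foldl_nil]
    rw [hget _ 0 (by omega) (by push_cast; ring), hget _ 1 (by omega) (by push_cast; ring), hab]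
    rfl
  · obtain ⟨a, b, c, habc⟩ := List.length_eq_three.mp hsuf
    rw [show List.range 3 = [0, 1, 2] from rfl]
    simp only [List.foldl_cons, List.foldl_nil]
    rw [hget _ 0 (by omega) (by push_cast; ring), hget _ 1 (by omega) (by push_cast; ring),
      hget _ 2 (by omega) (by push_cast; ring), habc]
    rfl

theorem mapIdx_map_range {β γ : Type} (g : Nat → β) (f : Nat → β → γ) (q : Nat) :
    List.mapIdx f ((List.range q).map g) = (List.range q).map (fun i => f i (g i)) := by
  apply List.ext_getElem (by simp)
  intro i h1 h2
  simp

-- XOR of bit-disjoint summands is addition.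
theorem xor_add_of_lt : ∀ (k a b : Nat), a < 2 ^ k → a ^^^ b * 2 ^ k = a + b * 2 ^ k := by
  intro k
  induction k with
  | zero => intro a b h; interval_cases a; simp
  | succ k ih =>
    intro a b h
    have hp : 2 ^ (k + 1) = 2 ^ k * 2 := Nat.pow_succ ..
    have h2 : a / 2 < 2 ^ k := by omega
    have hb : Nat.bit (a.testBit 0) (a >>> 1) = a := Nat.bit_testBit_zero_shiftRight_one a
    have hc : Nat.bit false (b * 2 ^ k) = b * 2 ^ (k + 1) := by
      simp [Nat.bit]; ring
    have hx : a.testBit 0 = decide (a % 2 = 1) := Nat.testBit_zero a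
    calc a ^^^ b * 2 ^ (k + 1)
        = Nat.bit (a.testBit 0) (a >>> 1) ^^^ Nat.bit false (b * 2 ^ k) := by rw [hb, hc]
      _ = Nat.bit (bne (a.testBit 0) false) ((a >>> 1) ^^^ b * 2 ^ k) := Nat.xor_bit _ _ _ _
      _ = Nat.bit (a.testBit 0) ((a >>> 1) + b * 2 ^ k) := by
          rw [ih _ b (by simpa [Nat.shiftRight_one] using h2)]; cases a.testBit 0 <;> rfl
      _ = a + b * 2 ^ (k + 1) := by
          have heq : b * 2 ^ (k + 1) = 2 * (b * 2 ^ k) := by rw [hp]; ring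
          rcases (by omega : a % 2 = 0 ∨ a % 2 = 1) with h0 | h0 <;>
            simp [Nat.bit, Nat.shiftRight_one, hx, h0] <;> omega

theorem ofLE_nil : ofLE [] = 0 := rfl
theorem ofLE_cons (b : Nat) (t : List Nat) : ofLE (b :: t) = b + 256 * ofLE t := rfl

theorem ofLE_lt (l : List Nat) (h : ∀ b ∈ l, b < 256) : ofLE l < 256 ^ l.length := by
  induction l with
  | nil => simp [ofLE]
  | cons b t ih =>
    have hb : b < 256 := h b (by simp)
    have ht := ih (fun x hx => h x (by simp [hx]))
    have hp : (256 : Nat) ^ (b :: t).length = 256 * 256 ^ t.length := by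
      simp [List.length_cons]; ring
    rw [ofLE_cons, hp]; omega

theorem ofLE_div256 (l : List Nat) (h : ∀ b ∈ l, b < 256) : ofLE l / 256 = ofLE l.tail := by
  cases l with
  | nil => simp [ofLE]
  | cons b t =>
    have hb : b < 256 := h b (by simp)
    rw [ofLE_cons, List.tail_cons, Nat.add_mul_div_left _ _ (by omega : (0:Nat) < 256),
      Nat.div_eq_of_lt hb, Nat.zero_add]

theorem ofLE_drop (l : List Nat) (h : ∀ b ∈ l, b < 256) : ∀ k, ofLE l / 256 ^ k = ofLE (l.drop k) := by
  intro k
  induction k with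
  | zero => simp
  | succ k ih =>
    have hd : ∀ b ∈ l.drop k, b < 256 := fun b hb => h b (List.mem_of_mem_drop hb)
    rw [Nat.pow_succ, ← Nat.div_div_eq_div_mul, ih, ofLE_div256 _ hd, List.tail_drop]

theorem ofLE_mod (l : List Nat) (h : ∀ b ∈ l, b < 256) : ∀ k, ofLE l % 256 ^ k = ofLE (l.take k) := by
  induction l with
  | nil => intro k; simp [ofLE]
  | cons b t ih =>
    intro k
    cases k with
    | zero => simp [ofLE, Nat.mod_one]
    | succ k =>
      have hb : b < 256 := h b (by simp)
      have ht : ∀ x ∈ t, x < 256 := fun x hx => h x (by simp [hx])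
      have hih := ih ht k
      have hdm := Nat.div_add_mod (ofLE t) (256 ^ k)
      have hlt : ofLE (t.take k) < 256 ^ k :=
        lt_of_lt_of_le (ofLE_lt _ (fun x hx => ht x (List.mem_of_mem_take hx)))
          (Nat.pow_le_pow_right (by omega) (List.length_take_le k t))
      rw [List.take_succ_cons, ofLE_cons, ofLE_cons, ← hih]
      have hexp : b + 256 * ofLE t
          = b + 256 * (ofLE t % 256 ^ k) + (256 ^ (k + 1)) * (ofLE t / 256 ^ k) := by
        conv_lhs => rw [← hdm]
        rw [Nat.pow_succ]; ring
      rw [hexp, Nat.add_mul_mod_self_left, Nat.mod_eq_of_lt (by rw [Nat.pow_succ, hih]; omega)]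

theorem ofLE_append_zeros (l : List Nat) (m : Nat) : ofLE (l ++ List.replicate m 0) = ofLE l := by
  induction l with
  | nil =>
    simp only [List.nil_append, ofLE_nil]
    induction m with
    | zero => rfl
    | succ m ih => rw [List.replicate_succ, ofLE_cons, ih]
  | cons b t ih => rw [List.cons_append, ofLE_cons, ofLE_cons, ih]

-- B's shift-and-mask word i is the base-256 value of bytes 4i .. 4i+3.
theorem word_eq (l : List Nat) (h : ∀ b ∈ l, b < 256) (i : Nat) :
    (ofLE l >>> (32 * i)) &&& 0xFFFFFFFF = ofLE ((l.drop (4 * i)).take 4) := by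
  rw [Nat.and_two_pow_sub_one_eq_mod _ 32, Nat.shiftRight_eq_div_pow,
    show (2 : Nat) ^ (32 * i) = 256 ^ (4 * i) by rw [show (256 : Nat) = 2 ^ 8 from rfl, ← Nat.pow_mul]; ring_nf,
    show (2 : Nat) ^ 32 = 256 ^ 4 from rfl, ofLE_drop _ h,
    ofLE_mod _ (fun b hb => h b (List.mem_of_mem_drop hb))]

-- A's XOR-of-shifts helper computes the base-256 value of a 4-byte list.
theorem littleendian_ofLE (l : List Nat) (h : ∀ b ∈ l, b < 256) (hl : l.length = 4) :
    littleendian (l.map (fun (b : Nat) => (b : Int))) = ((ofLE l : Nat) : Int) := by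
  obtain ⟨b0, b1, b2, b3, rfl⟩ := List.length_eq_four.mp hl
  have h0 : b0 < 256 := h b0 (by simp)
  have h1 : b1 < 256 := h b1 (by simp)
  have h2 : b2 < 256 := h b2 (by simp)
  have h3 : b3 < 256 := h b3 (by simp)
  have hsl : ∀ (m k : Nat), ((m : Int) <<< k) = ((m <<< k : Nat) : Int) := by
    intro m k; rw [Int.shiftLeft_eq, Nat.shiftLeft_eq]; push_cast; ring
  rw [show [b0, b1, b2, b3].map (fun (b : Nat) => (b : Int)) = [(b0 : Int), b1, b2, b3] from rfl]
  simp only [littleendian]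
  rw [show PySem.List.pyGetD [(b0:Int), b1, b2, b3] 0 0 = (b0 : Int) from rfl,
    show PySem.List.pyGetD [(b0:Int), b1, b2, b3] 1 0 = (b1 : Int) from rfl,
    show PySem.List.pyGetD [(b0:Int), b1, b2, b3] 2 0 = (b2 : Int) from rfl,
    show PySem.List.pyGetD [(b0:Int), b1, b2, b3] 3 0 = (b3 : Int) from rfl,
    hsl, hsl, hsl, PySem.Int.bxor_natCast, PySem.Int.bxor_natCast, PySem.Int.bxor_natCast]
  congr 1
  rw [Nat.shiftLeft_eq, Nat.shiftLeft_eq, Nat.shiftLeft_eq]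
  rw [xor_add_of_lt 8 b0 b1 h0,
    xor_add_of_lt 16 (b0 + b1 * 2 ^ 8) b2 (by omega),
    xor_add_of_lt 24 (b0 + b1 * 2 ^ 8 + b2 * 2 ^ 16) b3 (by omega)]
  simp [ofLE_cons, ofLE_nil]; ring

-- ===== VERDICT (by name: the statement is the Claim_ definition above) =====
theorem encrypt_plaintext_spec : Claim_equal_encrypt_plaintext := by
  intro ptext s hdom _
  unfold Spec_encrypt_plaintext encrypt_plaintext encrypt_plaintext_alt
  dsimp only
  -- byte lists and their bound from Dom
  set dataN : List Nat := ptext.toList.map (fun c => c.toNat) with hdataN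
  have hbound : ∀ b ∈ dataN, b < 256 := by
    intro b hb
    rw [hdataN] at hb
    obtain ⟨c, hc, rfl⟩ := List.mem_map.mp hb
    have := (List.all_eq_true.mp (Bool.and_elim_left hdom) c hc)
    simp [pvDomChar] at this
    omega
  have hdata : ptext.toList.map (fun x => (x.toNat : Int)) = dataN.map (fun (b : Nat) => (b : Int)) := by
    rw [hdataN, List.map_map]; rfl
  rw [hdata]
  set n := (dataN.map (fun (b : Nat) => (b : Int))).length with hn
  have hnN : n = dataN.length := by rw [hn]; simp
  have hlen : ptext.toList.length = n := by rw [hnN, hdataN]; simp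
  rw [remainder_eq, hlen]
  rw [show (0 : Nat) = 0 % 16 from rfl, loop_eq s _ [] 0]
  rw [List.mapIdx_append, mapIdx_map_range]
  simp only [List.length_map, List.length_range, List.nil_append, List.mapIdx_cons,
    List.mapIdx_nil, Nat.zero_add]
  rw [List.range_succ, List.map_append, List.map_cons, List.map_nil]
  congr 1
  -- the full 32-bit words
  · apply List.map_congr_left
    intro i hi
    have hiq : i < n / 4 := List.mem_range.mp hi
    congr 1
    rw [PySem.List.slice_natCast]
    have hsub : i * 4 + 4 - i * 4 = 4 := by omega
    rw [hsub, show i * 4 = 4 * i by ring, ← List.map_drop, ← List.map_take]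
    set chunk := (dataN.drop (4 * i)).take 4 with hchunk
    have hclen : chunk.length = 4 := by
      rw [hchunk, List.length_take, List.length_drop]; omega
    rw [littleendian_ofLE chunk
      (fun b hb => hbound b (List.mem_of_mem_drop (List.mem_of_mem_take hb))) hclen,
      word_eq dataN hbound i]
  -- the trailing partial word
  · congr 1
    rw [← hnN]
    have hq4 : n - n % 4 = 4 * (n / 4) := by omega
    rw [hq4, ← List.map_drop,
      show (List.replicate (4 - n % 4) (0 : Int)) = (List.replicate (4 - n % 4) (0 : Nat)).map (fun (b : Nat) => (b : Int)) by simp,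
      ← List.map_append]
    set chunk := dataN.drop (4 * (n / 4)) ++ List.replicate (4 - n % 4) 0 with hchunk
    have hclen : chunk.length = 4 := by
      rw [hchunk, List.length_append, List.length_drop, List.length_replicate, ← hnN]; omega
    rw [littleendian_ofLE chunk
      (fun b hb => by
        rcases List.mem_append.mp (hchunk ▸ hb) with h | h
        · exact hbound b (List.mem_of_mem_drop h)
        · have := List.eq_of_mem_replicate h; omega) hclen,
      word_eq dataN hbound (n / 4), hchunk, ofLE_append_zeros,
      List.take_of_length_le (by rw [List.length_drop, ← hnN]; omega)]
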